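-- pv_equiv track=rewrite | github.com/mal1on/checkio-solutions | Blizzard/Can Balance.py | can_balance
-- ===== SOURCE A (Python) =====
-- from typing import Iterable
--
-- def can_balance(weights: Iterable) -> int:
--     # your code here
--     result = -1
--     size = len(weights) - 1
--
--     def w_cal(comb):
--         weight = 0
--         for ind, item in enumerate(comb):
--             weight += item * (len(comb) - ind)
--         return weight
--
--     for ind, item in enumerate(weights):
--         comb_1, comb_2 = weights[:ind], weights[ind + 1:]
--         if w_cal(comb_1) == w_cal(comb_2[::-1]):
--             result = ind
--
--     return result
-- ===== SOURCE B (Python) =====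
-- from typing import Iterable
--
-- def can_balance(weights: Iterable) -> int:
--     # Single pass: running prefix mass/torque, compare against totals; keep last balance index.
--     total_mass = sum(weights)
--     total_torque = sum(j * w for j, w in enumerate(weights))
--     result = -1
--     left_mass = 0
--     left_torque = 0
--     for i, w in enumerate(weights):
--         left = i * left_mass - left_torque
--         right = (total_torque - left_torque - i * w) - i * (total_mass - left_mass - w)
--         if left == right:
--             result = i
--         left_mass += w
--         left_torque += i * w
--     return result
-- ===== Notes on version B (the rewrite author's own statement) =====
-- stated objective: faster
-- what changed: Replaced A's per-pivot rescan of both halves (recomputing every torque with w_cal on slices) by a single pass that maintains running prefix sums of mass and first moment and derives each side's torque in O(1).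
import Mathlib
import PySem

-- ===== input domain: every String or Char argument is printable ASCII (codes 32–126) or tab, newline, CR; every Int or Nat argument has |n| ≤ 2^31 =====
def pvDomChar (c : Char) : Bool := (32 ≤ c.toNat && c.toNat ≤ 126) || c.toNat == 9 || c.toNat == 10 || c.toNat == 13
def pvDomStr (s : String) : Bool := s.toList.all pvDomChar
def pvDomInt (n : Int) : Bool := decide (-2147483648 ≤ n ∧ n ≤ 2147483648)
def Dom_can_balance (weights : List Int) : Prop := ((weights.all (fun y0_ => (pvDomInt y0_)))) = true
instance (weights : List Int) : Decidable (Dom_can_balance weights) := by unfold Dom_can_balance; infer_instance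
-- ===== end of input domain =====

-- B replaces A's quadratic rescan of both halves at every pivot by one pass with
-- running prefix sums of mass and first-moment (torque); objective: faster (asymptotic).

-- ===== PORT A =====
-- inner helper w_cal of A
def pvWcal (comb : List Int) : Int :=
  (PySem.List.enumerate comb).foldl
    (fun weight p => weight + p.2 * ((comb.length : Int) - p.1)) 0

def can_balance (weights : List Int) : Int :=
  -- `size` is computed by A but never used; kept as a dead binding
  let _size : Int := (weights.length : Int) - 1
  (PySem.List.enumerate weights).foldl
    (fun result p =>
      let comb_1 := PySem.List.slice weights none (some p.1)
      let comb_2 := PySem.List.slice weights (some (p.1 + 1)) none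
      -- comb_2[::-1] is comb_2.reverse (PySem.List.slice?_none_none_neg_one)
      if pvWcal comb_1 = pvWcal comb_2.reverse then p.1 else result)
    (-1)

-- ===== PORT B =====
def can_balance_alt (weights : List Int) : Int :=
  let total_mass : Int := weights.sum
  let total_torque : Int := ((PySem.List.enumerate weights).map (fun p => p.1 * p.2)).sum
  let final :=
    (PySem.List.enumerate weights).foldl
      (fun (st : Int × Int × Int) p =>
        let result := st.1
        let left_mass := st.2.1
        let left_torque := st.2.2
        let i := p.1
        let w := p.2
        let left := i * left_mass - left_torque
        let right := (total_torque - left_torque - i * w) - i * (total_mass - left_mass - w)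
        ((if left = right then i else result), left_mass + w, left_torque + i * w))
      (-1, 0, 0)
  final.1

-- ===== PRECONDITION & SPEC =====
def Spec_can_balance (weights : List Int) (out : Int) : Prop := out = can_balance_alt weights
instance (weights : List Int) (out : Int) : Decidable (Spec_can_balance weights out) := by unfold Spec_can_balance; infer_instance

-- ===== CLAIM (what is proved, stated in full; the proofs are below) =====
def Claim_equal_can_balance : Prop := ∀ (weights : List Int), Dom_can_balance weights → Spec_can_balance weights (can_balance weights)

-- ===== LEMMAS AND PROOFS =====

/-- first-moment sum: Σ (s+k)·xs[k] over enumerate xs s -/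
def pvT (xs : List Int) (s : Int) : Int :=
  ((PySem.List.enumerate xs s).map (fun p => p.1 * p.2)).sum

theorem pvT_nil (s : Int) : pvT [] s = 0 := by
  simp [pvT, PySem.List.enumerate_nil]

theorem pvT_cons (x : Int) (xs : List Int) (s : Int) :
    pvT (x :: xs) s = s * x + pvT xs (s + 1) := by
  simp [pvT, PySem.List.enumerate_cons]

theorem pvT_shift (xs : List Int) (s t : Int) :
    pvT xs (s + t) = pvT xs s + t * xs.sum := by
  induction xs generalizing s with
  | nil => simp [pvT_nil]
  | cons x xs ih =>
    rw [pvT_cons, pvT_cons]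
    have := ih (s + 1)
    rw [show s + t + 1 = (s + 1) + t by ring, this]
    simp [List.sum_cons]
    ring

theorem pvT_append (ys zs : List Int) (s : Int) :
    pvT (ys ++ zs) s = pvT ys s + pvT zs (s + ys.length) := by
  induction ys generalizing s with
  | nil => simp [pvT_nil]
  | cons y ys ih =>
    rw [List.cons_append, pvT_cons, pvT_cons, ih,
      show s + (((y :: ys).length : Int)) = (s + 1) + ys.length by push_cast [List.length_cons]; ring]
    ring

theorem pvT_reverse (zs : List Int) :
    pvT zs.reverse 0 = ((zs.length : Int) - 1) * zs.sum - pvT zs 0 := by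
  induction zs with
  | nil => simp [pvT_nil]
  | cons z zs ih =>
    rw [List.reverse_cons, pvT_append, ih]
    have h1 : pvT zs 1 = pvT zs 0 + zs.sum := by
      have := pvT_shift zs 0 1; simpa using this
    simp [pvT_cons, pvT_nil, List.sum_cons, h1]
    ring

theorem foldl_add_map {α : Type} (f : α → Int) (l : List α) (init : Int) :
    l.foldl (fun w a => w + f a) init = init + (l.map f).sum := by
  induction l generalizing init with
  | nil => simp
  | cons x xs ih => simp [List.foldl_cons, ih]; ring

theorem sum_map_lin (xs : List Int) (c : Int) (s : Int) :
    ((PySem.List.enumerate xs s).map (fun p => p.2 * (c - p.1))).sum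
      = c * xs.sum - pvT xs s := by
  induction xs generalizing s with
  | nil => simp [pvT_nil, PySem.List.enumerate_nil]
  | cons x xs ih =>
    rw [PySem.List.enumerate_cons]
    simp only [List.map_cons, List.sum_cons, ih, pvT_cons, List.sum_cons]
    ring

/-- closed form of A's w_cal -/
theorem pvWcal_closed (xs : List Int) :
    pvWcal xs = (xs.length : Int) * xs.sum - pvT xs 0 := by
  unfold pvWcal
  rw [foldl_add_map, sum_map_lin]
  ring

/-- w_cal of a reversed list -/
theorem pvWcal_reverse (zs : List Int) :
    pvWcal zs.reverse = zs.sum + pvT zs 0 := by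
  rw [pvWcal_closed, pvT_reverse]
  simp
  ring

/-- the main loop invariant: both folds over the common suffix agree -/
theorem pv_main (L : List Int) : ∀ (rest : List Int) (k : Nat) (acc : Int),
    rest = L.drop k → k ≤ L.length →
    ∀ (Mtot Ttot : Int), Mtot = L.sum → Ttot = pvT L 0 →
    ((PySem.List.enumerate rest (k : Int)).foldl
      (fun result p =>
        let comb_1 := PySem.List.slice L none (some p.1)
        let comb_2 := PySem.List.slice L (some (p.1 + 1)) none
        if pvWcal comb_1 = pvWcal comb_2.reverse then p.1 else result)
      acc)
    =
    ((PySem.List.enumerate rest (k : Int)).foldl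
      (fun (st : Int × Int × Int) p =>
        let result := st.1
        let left_mass := st.2.1
        let left_torque := st.2.2
        let i := p.1
        let w := p.2
        let left := i * left_mass - left_torque
        let right := (Ttot - left_torque - i * w) - i * (Mtot - left_mass - w)
        ((if left = right then i else result), left_mass + w, left_torque + i * w))
      (acc, (L.take k).sum, pvT (L.take k) 0)).1 := by
  intro rest
  induction rest with
  | nil =>
    intro k acc _ _ Mtot Ttot _ _
    simp [PySem.List.enumerate_nil]
  | cons w rest' ih =>
    intro k acc hrest hk Mtot Ttot hM hT
    -- identify w and rest' with L[k] and L.drop (k+1)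
    have hklt : k < L.length := by
      by_contra h
      have hnil : L.drop k = [] := List.drop_eq_nil_of_le (by omega)
      rw [hnil] at hrest
      exact List.cons_ne_nil _ _ hrest
    have hdrop : L.drop k = L[k] :: L.drop (k + 1) := List.drop_eq_getElem_cons hklt
    have hw : w = L[k] := by rw [hdrop] at hrest; exact (List.cons.injEq _ _ _ _ ▸ hrest).1
    have hrest' : rest' = L.drop (k + 1) := by
      rw [hdrop] at hrest; exact (List.cons.injEq _ _ _ _ ▸ hrest).2
    subst hw hrest'
    -- slices
    have hs1 : PySem.List.slice L none (some (k : Int)) = L.take k :=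
      PySem.List.slice_to_natCast L k
    have hs2 : PySem.List.slice L (some ((k : Int) + 1)) none = L.drop (k + 1) := by
      have : ((k : Int) + 1) = ((k + 1 : Nat) : Int) := by push_cast; ring
      rw [this, PySem.List.slice_from_natCast]
    have hlen2 : (L.take k).length = k := by simp [List.length_take]; omega
    -- A's two torques in closed form
    have hA1 : pvWcal (L.take k) = (k : Int) * (L.take k).sum - pvT (L.take k) 0 := by
      rw [pvWcal_closed, hlen2]
    have hA2 : pvWcal (L.drop (k + 1)).reverse
        = (L.drop (k + 1)).sum + pvT (L.drop (k + 1)) 0 := pvWcal_reverse _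
    have hshift : ∀ (zs : List Int) (t : Int), pvT zs t = pvT zs 0 + t * zs.sum := by
      intro zs t
      have := pvT_shift zs 0 t; simpa using this
    -- total decompositions
    have hsumdec : Mtot = (L.take k).sum + L[k] + (L.drop (k + 1)).sum := by
      subst hM
      conv_lhs => rw [← List.take_append_drop k L]
      rw [List.sum_append, hdrop, List.sum_cons]
      ring
    have hTdec : Ttot = pvT (L.take k) 0 + pvT (L.drop (k + 1)) 0 + (L.drop (k + 1)).sum
        + (k : Int) * (L[k] + (L.drop (k + 1)).sum) := by
      subst hT
      have h0 : pvT L 0 = pvT (L.take k) 0 + pvT (L.drop k) ((0 : Int) + (L.take k).length) := by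
        conv_lhs => rw [← List.take_append_drop k L]
        exact pvT_append _ _ _
      have h1 : pvT (L.drop k) 0 = pvT (L.drop (k + 1)) 0 + (L.drop (k + 1)).sum := by
        rw [hdrop, pvT_cons]
        have := hshift (L.drop (k + 1)) (0 + 1)
        rw [this]; ring
      have h3 : (L.drop k).sum = L[k] + (L.drop (k + 1)).sum := by
        rw [hdrop, List.sum_cons]
      rw [h0, hshift (L.drop k) ((0 : Int) + (L.take k).length), h1, h3, hlen2]
      ring
    -- the two branch conditions are the same proposition
    have hcond : (pvWcal (PySem.List.slice L none (some (k : Int))) =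
        pvWcal (PySem.List.slice L (some ((k : Int) + 1)) none).reverse)
        = (((k : Int) * (L.take k).sum - pvT (L.take k) 0) =
          (Ttot - pvT (L.take k) 0 - (k : Int) * L[k])
            - (k : Int) * (Mtot - (L.take k).sum - L[k])) := by
      rw [hs1, hs2, hA1, hA2]
      have hr : (Ttot - pvT (L.take k) 0 - (k : Int) * L[k])
            - (k : Int) * (Mtot - (L.take k).sum - L[k])
          = (L.drop (k + 1)).sum + pvT (L.drop (k + 1)) 0 := by
        rw [hTdec, hsumdec]; ring
      rw [hr]
    -- state update matches the prefix sums at k+1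
    have htake : L.take (k + 1) = L.take k ++ [L[k]] := by
      rw [List.take_add_one]
      congr
      rw [List.getElem?_eq_getElem hklt]
      rfl
    have hS' : (L.take (k + 1)).sum = (L.take k).sum + L[k] := by
      rw [htake, List.sum_append, List.sum_cons, List.sum_nil]
      ring
    have hT' : pvT (L.take (k + 1)) 0 = pvT (L.take k) 0 + (k : Int) * L[k] := by
      rw [htake, pvT_append, pvT_cons, pvT_nil, hlen2]
      ring
    -- unfold one step of both folds
    rw [PySem.List.enumerate_cons]
    simp only [List.foldl_cons]
    simp only [hcond]
    have hcast : (k : Int) + 1 = ((k + 1 : Nat) : Int) := by push_cast; ring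
    rw [hcast, ← hS', ← hT']
    exact ih (k + 1) _ rfl (by omega) Mtot Ttot hM hT

-- ===== VERDICT (by name: the statement is the Claim_ definition above) =====
theorem can_balance_spec : Claim_equal_can_balance := by
  intro weights _
  unfold Spec_can_balance can_balance can_balance_alt
  have h := pv_main weights weights 0 (-1) (by simp) (Nat.zero_le _)
    weights.sum (pvT weights 0) rfl rfl
  simpa [pvT] using h
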